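-- pv_equiv track=rewrite | github.com/awakcon1234/BoatRacing | scripts/convert_tabs.py | convert_leading_indent
-- ===== SOURCE A (Python) =====
-- def convert_leading_indent(line: str) -> str:
--     # Convert only leading indent made of *whole* 4-space groups.
--     # Any remainder spaces (non-multiple-of-4) are preserved.
--     i = 0
--     n = len(line)
--     while i < n and line[i] == " ":
--         i += 1
--
--     if i == 0:
--         return line
--
--     tabs = i // 4
--     rem = i % 4
--     if tabs == 0:
--         return line
--
--     return ("\t" * tabs) + (" " * rem) + line[i:]
-- ===== SOURCE B (Python) =====
-- def convert_leading_indent(line: str) -> str: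
--     # Greedily consume whole 4-space groups from the front, one tab each;
--     # whatever is left (remainder spaces + rest) stays untouched.
--     tabs = ""
--     while line.startswith("    "):
--         tabs += "\t"
--         line = line[4:]
--     return tabs + line
-- ===== Notes on version B (the rewrite author's own statement) =====
-- stated objective: simpler
-- what changed: Replaced the count-all-spaces-then-divmod-and-rebuild approach (with i==0/tabs==0 guards) by a greedy loop that strips one whole 4-space group per iteration and emits a tab, so the remainder and the rest of the line need no reconstruction.
import Mathlib
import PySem

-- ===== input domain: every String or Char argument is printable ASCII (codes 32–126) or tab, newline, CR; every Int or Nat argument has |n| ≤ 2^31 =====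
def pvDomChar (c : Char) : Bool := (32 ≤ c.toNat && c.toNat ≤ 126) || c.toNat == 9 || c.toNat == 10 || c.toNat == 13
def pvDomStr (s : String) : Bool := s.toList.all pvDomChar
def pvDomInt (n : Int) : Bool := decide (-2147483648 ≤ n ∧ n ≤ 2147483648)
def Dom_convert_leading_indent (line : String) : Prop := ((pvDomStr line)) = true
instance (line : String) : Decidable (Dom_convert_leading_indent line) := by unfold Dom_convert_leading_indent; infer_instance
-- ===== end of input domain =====

-- B replaces A's count-then-divmod reconstruction by greedily stripping one 4-space group per step (simpler; same cost).


-- ===== PORT A =====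
-- the 'while i < n and line[i] == " "' index loop, as structural recursion over the characters
def cliCount : List Char → Nat
  | ' ' :: rest => cliCount rest + 1
  | _ => 0

def convert_leading_indent (line : String) : String :=
  let i := cliCount line.toList
  if i = 0 then line
  else
    let tabs := i / 4
    let rem := i % 4
    if tabs = 0 then line
    else String.ofList (List.replicate tabs '\t' ++ (List.replicate rem ' ' ++ line.toList.drop i))
      -- line[i:] with 0 ≤ i ≤ len: exactly List.drop i

-- ===== PORT B =====
-- the 'while line.startswith("    ")' loop: strip one 4-space group, emit one tab
def cliGo : List Char → List Char
  | ' ' :: ' ' :: ' ' :: ' ' :: rest => '\t' :: cliGo rest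
  | l => l

def convert_leading_indent_alt (line : String) : String :=
  String.ofList (cliGo line.toList)

-- ===== PRECONDITION & SPEC =====
def Spec_convert_leading_indent (line : String) (out : String) : Prop := out = convert_leading_indent_alt line
instance (line : String) (out : String) : Decidable (Spec_convert_leading_indent line out) := by unfold Spec_convert_leading_indent; infer_instance

-- ===== CLAIM (what is proved, stated in full; the proofs are below) =====
def Claim_equal_convert_leading_indent : Prop := ∀ (line : String), Dom_convert_leading_indent line → Spec_convert_leading_indent line (convert_leading_indent line)

-- ===== LEMMAS AND PROOFS =====
theorem cliSplit0 (l : List Char) :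
    List.replicate (cliCount l) ' ' ++ l.drop (cliCount l) = l := by
  induction l with
  | nil => simp [cliCount]
  | cons c rest ih =>
      by_cases hc : c = ' '
      · subst hc; simp [cliCount, List.replicate_succ, ih]
      · simp [cliCount, hc]

theorem cliCount_le_three_of_no4 (l : List Char)
    (h : ∀ rest, l ≠ ' ' :: ' ' :: ' ' :: ' ' :: rest) : cliCount l ≤ 3 := by
  by_contra hgt
  push Not at hgt
  obtain ⟨k, hk⟩ : ∃ k, cliCount l = 4 + k := ⟨cliCount l - 4, by omega⟩
  have hs := cliSplit0 l
  rw [hk, List.replicate_add] at hs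
  exact h (List.replicate k ' ' ++ l.drop (4 + k))
    (by
      set d := l.drop (4 + k) with hd
      rw [← hs, List.append_assoc]
      rfl)

theorem cliGo_eq (l : List Char) :
    cliGo l = List.replicate (cliCount l / 4) '\t' ++
      (List.replicate (cliCount l % 4) ' ' ++ l.drop (cliCount l)) := by
  fun_induction cliGo l with
  | case1 rest ih =>
      have hc : cliCount (' ' :: ' ' :: ' ' :: ' ' :: rest) = cliCount rest + 4 := by
        simp [cliCount]
      have h4 : (cliCount rest + 4) / 4 = cliCount rest / 4 + 1 := by omega
      have hm : (cliCount rest + 4) % 4 = cliCount rest % 4 := by omega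
      simp [hc, h4, hm, List.replicate_succ, ih]
  | case2 l h =>
      have h3 : cliCount l ≤ 3 := cliCount_le_three_of_no4 _ h
      have hd : cliCount l / 4 = 0 := by omega
      have hm : cliCount l % 4 = cliCount l := by omega
      simp [hd, hm, cliSplit0]

-- ===== VERDICT (by name: the statement is the Claim_ definition above) =====
theorem convert_leading_indent_spec : Claim_equal_convert_leading_indent := by
  intro line _
  unfold Spec_convert_leading_indent convert_leading_indent convert_leading_indent_alt
  rw [cliGo_eq]
  by_cases h0 : cliCount line.toList = 0
  · simp [h0, String.ofList_toList]
  · by_cases ht : cliCount line.toList / 4 = 0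
    · have hm : cliCount line.toList % 4 = cliCount line.toList := by omega
      simp [h0, ht, hm, cliSplit0, String.ofList_toList]
    · simp [h0, ht]
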